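-- pv_equiv track=rewrite | github.com/kumbarsumant/dsa-notes | dynamic_programming/03_total_possible_paths_in_matrix.py/2_memoization_solution.py | _find_total_possible_paths
-- ===== SOURCE A (Python) =====
-- def _find_total_possible_paths(matrix, i, j, lookup=None):
--     # Dictionary is used as lookup (we can also use 2D matrix for lookup as well)
--     if lookup is None:
--         lookup = {}
--
--     # Check for the solution in the lookup (cache)
--     if (i, j) in lookup:
--         return lookup[(i, j)]
--
--     # 1. Wall Case: No paths possible through a wall
--     if matrix[i][j] == 1:
--         return 0
--
--     # 2. Base Case: Reached the origin
--     if i == 0 and j == 0: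
--         return 1
--
--     # 3. Boundary Case: Top Row (Only come from the left)
--     if i == 0:
--         possible_paths = _find_total_possible_paths(matrix, i, j - 1, lookup)
--         lookup[(i, j)] = possible_paths
--         return possible_paths
--
--     # 4. Boundary Case: First Column (Only come from above)
--     if j == 0:
--         possible_paths = _find_total_possible_paths(matrix, i - 1, j, lookup)
--         lookup[(i, j)] = possible_paths
--         return possible_paths
--
--     # 5. General Case: Sum of paths from top and left
--     total_path_top_cell = _find_total_possible_paths(matrix, i - 1, j, lookup)
--     total_paths_left_cell = _find_total_possible_paths(matrix, i, j - 1, lookup)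
--
--     possible_paths = total_path_top_cell + total_paths_left_cell
--     lookup[(i, j)] = possible_paths
--     return possible_paths
-- ===== SOURCE B (Python) =====
-- def _find_total_possible_paths(matrix, i, j, lookup=None):
--     # Bottom-up DP (two rolling rows) instead of memoized recursion; honors a
--     # pre-seeded lookup read-only. NOTE: A mutates the caller's lookup dict in
--     # place; B does not -- equivalence is about the return value only.
--     cache = {} if lookup is None else lookup
--     prev = []
--     for r in range(i + 1):
--         row = matrix[r]
--         cur = []
--         for c in range(j + 1):
--             if (r, c) in cache:
--                 v = cache[(r, c)]
--             elif row[c] == 1: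
--                 v = 0
--             elif r == 0 and c == 0:
--                 v = 1
--             elif r == 0:
--                 v = cur[c - 1]
--             elif c == 0:
--                 v = prev[0]
--             else:
--                 v = prev[c] + cur[c - 1]
--             cur.append(v)
--         prev = cur
--     return prev[j]
-- ===== Notes on version B (the rewrite author's own statement) =====
-- stated objective: alternative
-- what changed: Replaces the top-down memoized recursion (dict cache threaded through recursive calls) with an iterative bottom-up DP over two rolling rows that reads the seeded lookup per cell; B does not mutate the caller's lookup (return-value equivalence only).
-- outside the precondition, e.g. on _find_total_possible_paths([[0]], 5, 0, {(5, 0): 7}): A returns 7, B raises IndexError; on _find_total_possible_paths([[0], [1, 1]], 1, 1, None): A returns 0, B raises IndexError; on _find_total_possible_paths([[1]], -1, -1, None): A returns 0, B raises IndexError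
import Mathlib
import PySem

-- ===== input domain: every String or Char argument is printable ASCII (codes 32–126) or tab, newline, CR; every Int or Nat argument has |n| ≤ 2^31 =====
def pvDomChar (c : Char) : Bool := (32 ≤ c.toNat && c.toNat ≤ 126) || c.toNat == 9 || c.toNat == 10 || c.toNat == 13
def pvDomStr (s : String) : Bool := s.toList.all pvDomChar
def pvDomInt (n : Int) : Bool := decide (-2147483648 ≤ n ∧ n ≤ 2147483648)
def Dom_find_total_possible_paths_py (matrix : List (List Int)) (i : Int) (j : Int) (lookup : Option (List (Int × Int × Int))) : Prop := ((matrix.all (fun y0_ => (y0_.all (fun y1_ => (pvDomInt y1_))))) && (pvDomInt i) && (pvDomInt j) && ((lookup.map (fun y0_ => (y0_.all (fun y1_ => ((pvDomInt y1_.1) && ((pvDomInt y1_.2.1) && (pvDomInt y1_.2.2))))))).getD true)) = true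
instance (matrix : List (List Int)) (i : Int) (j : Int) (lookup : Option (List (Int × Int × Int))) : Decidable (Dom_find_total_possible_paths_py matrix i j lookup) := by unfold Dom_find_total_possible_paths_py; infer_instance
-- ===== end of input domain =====

-- B replaces A's top-down memoized recursion by an iterative bottom-up DP over two
-- rolling rows (alternative decomposition, same O(i*j) cost); A mutates the caller's
-- lookup dict in place, B does not — the equivalence proved here is about the RETURN
-- value only.

-- ===== PORT A =====
-- first-match lookup in the dict's association list (key = (a,b)); shared by both ports
def pvLkGet (lk : List (Int × Int × Int)) (a b : Int) : Option Int :=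
  match lk with
  | [] => none
  | (x, y, v) :: rest => if x = a ∧ y = b then some v else pvLkGet rest a b

-- matrix[i][j] (Python indexing; none = IndexError, excluded by Pre_)
def pvMget (matrix : List (List Int)) (a b : Int) : Option Int :=
  (PySem.List.pyGet? matrix a).bind (fun row => PySem.List.pyGet? row b)

-- A's memoized recursion, threading the mutated lookup dict (writes are appends: A only
-- caches keys that are absent). The fuel only makes the same computation total; inside
-- Pre_ the fuel given below never runs out.
def pvGoA (matrix : List (List Int)) : Nat → Int → Int → List (Int × Int × Int) → Int × List (Int × Int × Int)
  | 0, _, _, lk => (0, lk)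
  | fuel+1, i, j, lk =>
    match pvLkGet lk i j with
    | some v => (v, lk)
    | none =>
      match pvMget matrix i j with
      | none => (0, lk)   -- Python raises IndexError here; outside Pre_
      | some m =>
        if m = 1 then (0, lk)
        else if i = 0 ∧ j = 0 then (1, lk)
        else if i = 0 then
          let p := pvGoA matrix fuel i (j-1) lk
          (p.1, p.2 ++ [(i, j, p.1)])
        else if j = 0 then
          let p := pvGoA matrix fuel (i-1) j lk
          (p.1, p.2 ++ [(i, j, p.1)])
        else
          let t := pvGoA matrix fuel (i-1) j lk
          let l := pvGoA matrix fuel i (j-1) t.2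
          (t.1 + l.1, l.2 ++ [(i, j, t.1 + l.1)])

def find_total_possible_paths_py (matrix : List (List Int)) (i : Int) (j : Int) (lookup : Option (List (Int × Int × Int))) : Int :=
  (pvGoA matrix (i.toNat + j.toNat + 1) i j (lookup.getD [])).1

-- ===== PORT B =====
-- one row of the bottom-up DP (Source B's inner loop); prev is the previous dp row.
-- Python's raising indexing row[c] / cur[c-1] / prev[c] is ported as pyGetD … 0,
-- exact wherever the index is in range (always, inside Pre_).
def pvRowB (cache : List (Int × Int × Int)) (row : List Int) (r : Int) (prev : List Int) (j : Int) : List Int :=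
  (PySem.List.pyRange 0 (j+1) 1).foldl (fun cur c =>
    let v :=
      match pvLkGet cache r c with
      | some v => v
      | none =>
        if PySem.List.pyGetD row c 0 = 1 then 0
        else if r = 0 ∧ c = 0 then 1
        else if r = 0 then PySem.List.pyGetD cur (c-1) 0
        else if c = 0 then PySem.List.pyGetD prev 0 0
        else PySem.List.pyGetD prev c 0 + PySem.List.pyGetD cur (c-1) 0
    cur ++ [v]) []

def find_total_possible_paths_py_alt (matrix : List (List Int)) (i : Int) (j : Int) (lookup : Option (List (Int × Int × Int))) : Int :=
  PySem.List.pyGetD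
    ((PySem.List.pyRange 0 (i+1) 1).foldl
      (fun prev r => pvRowB (lookup.getD []) (PySem.List.pyGetD matrix r []) r prev j) []) j 0

-- ===== PRECONDITION & SPEC =====
-- Pre_ excludes the inputs on which A raises IndexError, and also those where a
-- pre-seeded cache hit, a wall at (i,j) or negative-index wraparound lets A return a
-- value although some cell of the (i+1)x(j+1) rectangle is out of range (there B raises).
def Pre_find_total_possible_paths_py (matrix : List (List Int)) (i : Int) (j : Int) (lookup : Option (List (Int × Int × Int))) : Prop :=
  0 ≤ i ∧ i < matrix.length ∧ 0 ≤ j ∧ ∀ row ∈ matrix.take (i.toNat + 1), j < row.length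
instance (matrix : List (List Int)) (i : Int) (j : Int) (lookup : Option (List (Int × Int × Int))) : Decidable (Pre_find_total_possible_paths_py matrix i j lookup) := by unfold Pre_find_total_possible_paths_py; infer_instance

def pvWitness_find_total_possible_paths_py : List (List Int) × Int × Int × (Option (List (Int × Int × Int))) :=
  ([[0, 0], [0, 0]], 1, 1, some [(0, 1, 3)])

def Spec_find_total_possible_paths_py (matrix : List (List Int)) (i : Int) (j : Int) (lookup : Option (List (Int × Int × Int))) (out : Int) : Prop := out = find_total_possible_paths_py_alt matrix i j lookup
instance (matrix : List (List Int)) (i : Int) (j : Int) (lookup : Option (List (Int × Int × Int))) (out : Int) : Decidable (Spec_find_total_possible_paths_py matrix i j lookup out) := by unfold Spec_find_total_possible_paths_py; infer_instance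

-- ===== CLAIM (what is proved, stated in full; the proofs are below) =====
def Claim_equal_find_total_possible_paths_py : Prop := ∀ (matrix : List (List Int)) (i : Int) (j : Int) (lookup : Option (List (Int × Int × Int))), Dom_find_total_possible_paths_py matrix i j lookup → Pre_find_total_possible_paths_py matrix i j lookup → Spec_find_total_possible_paths_py matrix i j lookup (find_total_possible_paths_py matrix i j lookup)

-- ===== LEMMAS AND PROOFS =====

-- the mathematical value both programs compute for cell (r,c): a seeded cache entry
-- overrides (cache is checked before the wall test, as in both programs)
def pvF (M : List (List Int)) (L : List (Int × Int × Int)) (r c : Nat) : Int :=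
  match pvLkGet L (r : Int) (c : Int) with
  | some v => v
  | none =>
    if (M.getD r []).getD c 0 = 1 then 0
    else if _hr : r = 0 then
      (if _hc : c = 0 then 1 else pvF M L 0 (c-1))
    else if _hc : c = 0 then pvF M L (r-1) 0
    else pvF M L (r-1) c + pvF M L r (c-1)
termination_by (r, c)
decreasing_by all_goals omega

lemma pvF_cache {M : List (List Int)} {L : List (Int × Int × Int)} {r c : Nat} {v : Int}
    (h : pvLkGet L (r : Int) (c : Int) = some v) : pvF M L r c = v := by
  rw [pvF, h]

lemma pvF_of_none {M : List (List Int)} {L : List (Int × Int × Int)} {r c : Nat}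
    (h : pvLkGet L (r : Int) (c : Int) = none) :
    pvF M L r c = if (M.getD r []).getD c 0 = 1 then 0
      else if r = 0 then (if c = 0 then 1 else pvF M L 0 (c-1))
      else if c = 0 then pvF M L (r-1) 0
      else pvF M L (r-1) c + pvF M L r (c-1) := by
  rw [pvF, h]; simp only [dite_eq_ite]

lemma pvLkGet_append (l1 l2 : List (Int × Int × Int)) (a b : Int) :
    pvLkGet (l1 ++ l2) a b = (pvLkGet l1 a b).or (pvLkGet l2 a b) := by
  induction l1 with
  | nil => simp [pvLkGet]
  | cons e t ih =>
    obtain ⟨x, y, v⟩ := e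
    by_cases hxy : x = a ∧ y = b <;> simp [pvLkGet, hxy, ih]

-- extensions of the caller's lookup that A writes: nonnegative keys carrying pvF values
def pvGood (M : List (List Int)) (L : List (Int × Int × Int)) (ext : List (Int × Int × Int)) : Prop :=
  ∀ e ∈ ext, 0 ≤ e.1 ∧ 0 ≤ e.2.1 ∧ e.2.2 = pvF M L e.1.toNat e.2.1.toNat

lemma pvGood_lookup {M : List (List Int)} {L ext : List (Int × Int × Int)}
    (hg : pvGood M L ext) {r c : Nat} {v : Int}
    (h : pvLkGet (L ++ ext) (r : Int) (c : Int) = some v) : v = pvF M L r c := by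
  rw [pvLkGet_append] at h
  cases h0 : pvLkGet L (r : Int) (c : Int) with
  | some w =>
    rw [h0] at h
    simp only [Option.or] at h
    cases h
    exact (pvF_cache h0).symm
  | none =>
    rw [h0] at h; simp only [Option.none_or] at h
    induction ext with
    | nil => simp [pvLkGet] at h
    | cons e t ih =>
      obtain ⟨x, y, w⟩ := e
      by_cases hxy : x = (r : Int) ∧ y = (c : Int)
      · simp [pvLkGet, hxy] at h
        have := hg (x, y, w) (by simp)
        simp only at this
        rw [← h, this.2.2, hxy.1, hxy.2]
        simp
      · simp only [pvLkGet, hxy, if_false] at h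
        exact ih (fun e he => hg e (List.mem_cons_of_mem _ he)) h

lemma pvGood_append {M : List (List Int)} {L : List (Int × Int × Int)} {e1 e2 : List (Int × Int × Int)}
    (h1 : pvGood M L e1) (h2 : pvGood M L e2) : pvGood M L (e1 ++ e2) := by
  intro e he; rcases List.mem_append.mp he with h | h
  · exact h1 e h
  · exact h2 e h

lemma pvRow_mem_take {M : List (List Int)} {I r : Nat} (hI : I < M.length) (hr : r ≤ I) :
    M.getD r [] ∈ M.take (I + 1) := by
  have hrlen : r < M.length := lt_of_le_of_lt hr hI
  rw [List.getD_eq_getElem _ _ hrlen]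
  have h2 : r < (M.take (I + 1)).length := by rw [List.length_take]; omega
  have : M[r] = (M.take (I + 1))[r] := by
    rw [List.getElem_take]
  rw [this]
  exact List.getElem_mem _

lemma pvMget_eq {M : List (List Int)} {r c : Nat} (hr : r < M.length)
    (hc : c < (M.getD r []).length) :
    pvMget M (r : Int) (c : Int) = some ((M.getD r []).getD c 0) := by
  have hgr : M.getD r [] = M[r] := List.getD_eq_getElem _ _ hr
  rw [hgr] at hc ⊢
  simp [pvMget, PySem.List.pyGet?_natCast, List.getElem?_eq_getElem hr,
        List.getElem?_eq_getElem hc]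

-- one-step unfolding lemmas for pvGoA
lemma pvGoA_cache {M : List (List Int)} {f : Nat} {i j : Int} {lk : List (Int × Int × Int)} {v : Int}
    (h : pvLkGet lk i j = some v) : pvGoA M (f+1) i j lk = (v, lk) := by
  simp [pvGoA, h]

lemma pvGoA_wall {M : List (List Int)} {f : Nat} {i j : Int} {lk : List (Int × Int × Int)} {m : Int}
    (h : pvLkGet lk i j = none) (hm : pvMget M i j = some m) (h1 : m = 1) :
    pvGoA M (f+1) i j lk = (0, lk) := by
  simp [pvGoA, h, hm, h1]

lemma pvGoA_base {M : List (List Int)} {f : Nat} {i j : Int} {lk : List (Int × Int × Int)} {m : Int}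
    (h : pvLkGet lk i j = none) (hm : pvMget M i j = some m) (h1 : m ≠ 1)
    (hij : i = 0 ∧ j = 0) : pvGoA M (f+1) i j lk = (1, lk) := by
  obtain ⟨hi, hj⟩ := hij; subst hi; subst hj
  simp [pvGoA, h, hm, h1]

lemma pvGoA_row {M : List (List Int)} {f : Nat} {i j : Int} {lk : List (Int × Int × Int)} {m : Int}
    (h : pvLkGet lk i j = none) (hm : pvMget M i j = some m) (h1 : m ≠ 1)
    (hij : ¬(i = 0 ∧ j = 0)) (hi : i = 0) :
    pvGoA M (f+1) i j lk =
      ((pvGoA M f i (j-1) lk).1, (pvGoA M f i (j-1) lk).2 ++ [(i, j, (pvGoA M f i (j-1) lk).1)]) := by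
  subst hi
  have hj : j ≠ 0 := fun hj => hij ⟨rfl, hj⟩
  simp [pvGoA, h, hm, h1, hj]

lemma pvGoA_col {M : List (List Int)} {f : Nat} {i j : Int} {lk : List (Int × Int × Int)} {m : Int}
    (h : pvLkGet lk i j = none) (hm : pvMget M i j = some m) (h1 : m ≠ 1)
    (_hij : ¬(i = 0 ∧ j = 0)) (hi : i ≠ 0) (hj : j = 0) :
    pvGoA M (f+1) i j lk =
      ((pvGoA M f (i-1) j lk).1, (pvGoA M f (i-1) j lk).2 ++ [(i, j, (pvGoA M f (i-1) j lk).1)]) := by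
  subst hj
  simp [pvGoA, h, hm, h1, hi]

lemma pvGoA_gen {M : List (List Int)} {f : Nat} {i j : Int} {lk : List (Int × Int × Int)} {m : Int}
    (h : pvLkGet lk i j = none) (hm : pvMget M i j = some m) (h1 : m ≠ 1)
    (_hij : ¬(i = 0 ∧ j = 0)) (hi : i ≠ 0) (hj : j ≠ 0) :
    pvGoA M (f+1) i j lk =
      ((pvGoA M f (i-1) j lk).1 + (pvGoA M f i (j-1) (pvGoA M f (i-1) j lk).2).1,
        (pvGoA M f i (j-1) (pvGoA M f (i-1) j lk).2).2 ++
          [(i, j, (pvGoA M f (i-1) j lk).1 + (pvGoA M f i (j-1) (pvGoA M f (i-1) j lk).2).1)]) := by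
  simp [pvGoA, h, hm, h1, hi, hj]

-- A's recursion computes pvF and only appends Good entries to the lookup
lemma pvGoA_main (M : List (List Int)) (L : List (Int × Int × Int)) (I J : Nat)
    (hI : I < M.length) (hJ : ∀ r : Nat, r ≤ I → J < (M.getD r []).length) :
    ∀ fuel r c : Nat, r ≤ I → c ≤ J → r + c < fuel → ∀ ext, pvGood M L ext →
    ∃ ext', pvGoA M fuel (r : Int) (c : Int) (L ++ ext) = (pvF M L r c, L ++ ext') ∧
      pvGood M L ext' := by
  intro fuel
  induction fuel with
  | zero => intro r c _ _ h; omega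
  | succ f ih =>
    intro r c hr hc hf ext hg
    have hrlen : r < M.length := lt_of_le_of_lt hr hI
    have hclen : c < (M.getD r []).length := lt_of_le_of_lt hc (hJ r hr)
    have hm := pvMget_eq hrlen hclen (c := c)
    cases hlk : pvLkGet (L ++ ext) (r : Int) (c : Int) with
    | some v =>
      exact ⟨ext, by rw [pvGoA_cache hlk, pvGood_lookup hg hlk], hg⟩
    | none =>
      have h0 : pvLkGet L (r : Int) (c : Int) = none := by
        rw [pvLkGet_append] at hlk
        cases h' : pvLkGet L (r : Int) (c : Int) with
        | none => rfl
        | some w => rw [h'] at hlk; simp at hlk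
      by_cases hwall : (M.getD r []).getD c 0 = 1
      · refine ⟨ext, ?_, hg⟩
        rw [pvGoA_wall hlk hm hwall, pvF_of_none h0, if_pos hwall]
      · by_cases hrc : r = 0 ∧ c = 0
        · refine ⟨ext, ?_, hg⟩
          rw [pvGoA_base hlk hm hwall (by simp [hrc.1, hrc.2]),
              pvF_of_none h0, if_neg hwall, if_pos hrc.1, if_pos hrc.2]
        · have hrcInt : ¬((r : Int) = 0 ∧ (c : Int) = 0) := by
            simpa [Nat.cast_eq_zero] using hrc
          by_cases hr0 : r = 0
          · -- top row: recurse left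
            have hcne : c ≠ 0 := fun h => hrc ⟨hr0, h⟩
            have hcast : (c : Int) - 1 = ((c - 1 : Nat) : Int) := by omega
            obtain ⟨ext1, heq, hg1⟩ := ih r (c - 1) hr (by omega) (by omega) ext hg
            have hval : pvF M L r c = pvF M L r (c - 1) := by
              rw [pvF_of_none h0, if_neg hwall, if_pos hr0, if_neg hcne, hr0]
            refine ⟨ext1 ++ [((r : Int), (c : Int), pvF M L r c)], ?_, ?_⟩
            · rw [pvGoA_row hlk hm hwall hrcInt (by simp [hr0]), hcast, heq]
              rw [hval, List.append_assoc]
            · refine pvGood_append hg1 ?_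
              intro e he; simp only [List.mem_singleton] at he; subst he
              exact ⟨Int.natCast_nonneg r, Int.natCast_nonneg c, by simp⟩
          · by_cases hc0 : c = 0
            · -- first column: recurse up
              have hcast : (r : Int) - 1 = ((r - 1 : Nat) : Int) := by omega
              obtain ⟨ext1, heq, hg1⟩ := ih (r - 1) c (by omega) hc (by omega) ext hg
              have hval : pvF M L r c = pvF M L (r - 1) c := by
                rw [pvF_of_none h0, if_neg hwall, if_neg hr0, if_pos hc0, hc0]
              refine ⟨ext1 ++ [((r : Int), (c : Int), pvF M L r c)], ?_, ?_⟩
              · rw [pvGoA_col hlk hm hwall hrcInt (by simpa [Nat.cast_eq_zero] using hr0)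
                    (by simp [hc0]), hcast, heq]
                rw [hval, List.append_assoc]
              · refine pvGood_append hg1 ?_
                intro e he; simp only [List.mem_singleton] at he; subst he
                exact ⟨Int.natCast_nonneg r, Int.natCast_nonneg c, by simp⟩
            · -- general cell
              have hcastr : (r : Int) - 1 = ((r - 1 : Nat) : Int) := by omega
              have hcastc : (c : Int) - 1 = ((c - 1 : Nat) : Int) := by omega
              obtain ⟨ext1, heq1, hg1⟩ := ih (r - 1) c (by omega) hc (by omega) ext hg
              obtain ⟨ext2, heq2, hg2⟩ := ih r (c - 1) hr (by omega) (by omega) ext1 hg1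
              have hval : pvF M L r c = pvF M L (r - 1) c + pvF M L r (c - 1) := by
                rw [pvF_of_none h0, if_neg hwall, if_neg hr0, if_neg hc0]
              refine ⟨ext2 ++ [((r : Int), (c : Int), pvF M L r c)], ?_, ?_⟩
              · rw [pvGoA_gen hlk hm hwall hrcInt (by simpa [Nat.cast_eq_zero] using hr0)
                    (by simpa [Nat.cast_eq_zero] using hc0), hcastr, heq1, hcastc, heq2]
                rw [hval, List.append_assoc]
              · refine pvGood_append hg2 ?_
                intro e he; simp only [List.mem_singleton] at he; subst he
                exact ⟨Int.natCast_nonneg r, Int.natCast_nonneg c, by simp⟩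

-- B's inner loop as a named step function (definitionally pvRowB's fold body)
def pvStepB (cache : List (Int × Int × Int)) (row prev : List Int) (r : Int) (cur : List Int) (c : Int) : List Int :=
  let v :=
    match pvLkGet cache r c with
    | some v => v
    | none =>
      if PySem.List.pyGetD row c 0 = 1 then 0
      else if r = 0 ∧ c = 0 then 1
      else if r = 0 then PySem.List.pyGetD cur (c-1) 0
      else if c = 0 then PySem.List.pyGetD prev 0 0
      else PySem.List.pyGetD prev c 0 + PySem.List.pyGetD cur (c-1) 0
  cur ++ [v]

lemma pvRowB_foldl (cache : List (Int × Int × Int)) (row prev : List Int) (r j : Int) :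
    pvRowB cache row r prev j = (PySem.List.pyRange 0 (j+1) 1).foldl (pvStepB cache row prev r) [] := rfl

-- one step of B's inner loop extends [pvF r 0, …, pvF r (n-1)] by pvF r n
lemma pvStepB_val (M : List (List Int)) (L : List (Int × Int × Int)) (J r n : Nat)
    (prev : List Int)
    (hprev : r ≠ 0 → prev = (List.range (J + 1)).map (fun c => pvF M L (r - 1) c))
    (hn : n ≤ J) :
    pvStepB L (M.getD r []) prev (r : Int) ((List.range n).map (fun c => pvF M L r c)) (n : Int) =
      (List.range n).map (fun c => pvF M L r c) ++ [pvF M L r n] := by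
  unfold pvStepB
  cases hlk : pvLkGet L (r : Int) (n : Int) with
  | some v => rw [pvF_cache hlk]
  | none =>
    simp only [PySem.List.pyGetD_natCast, PySem.List.pyGetD_zero, Nat.cast_eq_zero]
    rw [pvF_of_none hlk]
    by_cases hwall : (M.getD r []).getD n 0 = 1
    · rw [if_pos hwall, if_pos hwall]
    · rw [if_neg hwall, if_neg hwall]
      by_cases hr0 : r = 0
      · by_cases hn0 : n = 0
        · rw [if_pos ⟨hr0, hn0⟩, if_pos hr0, if_pos hn0]
        · rw [if_neg (fun h => hn0 h.2), if_pos hr0, if_pos hr0, if_neg hn0,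
              show ((n : Int) - 1) = ((n - 1 : Nat) : Int) by omega,
              PySem.List.pyGetD_natCast, PySem.List.getD_map_range _ n (n - 1) 0 (by omega), hr0]
      · rw [if_neg (fun h => hr0 h.1), if_neg hr0, if_neg hr0]
        by_cases hn0 : n = 0
        · rw [if_pos hn0, if_pos hn0, hprev hr0,
              PySem.List.getD_map_range _ (J + 1) 0 0 (by omega), hn0]
        · rw [if_neg hn0, if_neg hn0, hprev hr0,
              show ((n : Int) - 1) = ((n - 1 : Nat) : Int) by omega,
              PySem.List.pyGetD_natCast,
              PySem.List.getD_map_range _ (J + 1) n 0 (by omega),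
              PySem.List.getD_map_range _ n (n - 1) 0 (by omega)]

-- B's inner loop builds exactly [pvF r 0, …, pvF r J]
lemma pvRowB_eq (M : List (List Int)) (L : List (Int × Int × Int)) (J r : Nat)
    (_hrow : J < (M.getD r []).length) (prev : List Int)
    (hprev : r ≠ 0 → prev = (List.range (J + 1)).map (fun c => pvF M L (r - 1) c)) :
    pvRowB L (M.getD r []) (r : Int) prev (J : Int) =
      (List.range (J + 1)).map (fun c => pvF M L r c) := by
  rw [pvRowB_foldl,
      show ((J : Int) + 1) = ((J + 1 : Nat) : Int) by push_cast; ring,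
      PySem.List.pyRange_zero_natCast, List.foldl_map]
  have aux : ∀ n, n ≤ J + 1 →
      (List.range n).foldl (fun cur (k : Nat) => pvStepB L (M.getD r []) prev (r : Int) cur (k : Int)) [] =
        (List.range n).map (fun c => pvF M L r c) := by
    intro n
    induction n with
    | zero => intro _; simp
    | succ n ih =>
      intro hn
      rw [List.range_succ, List.foldl_append, List.map_append, ih (by omega)]
      simp only [List.foldl_cons, List.foldl_nil, List.map_cons, List.map_nil]
      exact pvStepB_val M L J r n prev hprev (by omega)
  exact aux (J + 1) le_rfl

-- B's outer loop: after n rows, prev is row n-1 of the dp table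
lemma pvAltB_fold (M : List (List Int)) (L : List (Int × Int × Int)) (I J : Nat)
    (_hI : I < M.length) (hJ : ∀ r : Nat, r ≤ I → J < (M.getD r []).length) :
    ∀ n, n ≤ I + 1 →
    (List.range n).foldl
        (fun (prev : List Int) (r : Nat) => pvRowB L (PySem.List.pyGetD M (r : Int) []) (r : Int) prev (J : Int)) [] =
      if n = 0 then [] else (List.range (J + 1)).map (fun c => pvF M L (n - 1) c) := by
  intro n
  induction n with
  | zero => intro _; simp
  | succ n ih =>
    intro hn
    rw [List.range_succ, List.foldl_append, ih (by omega)]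
    simp only [List.foldl_cons, List.foldl_nil, Nat.succ_ne_zero, if_false,
      Nat.add_sub_cancel, PySem.List.pyGetD_natCast]
    rw [pvRowB_eq M L J n (hJ n (by omega))]
    intro hn0
    rw [if_neg hn0]

-- ===== VERDICT (by name: the statement is the Claim_ definition above) =====
theorem find_total_possible_paths_py_spec : Claim_equal_find_total_possible_paths_py := by
  intro matrix i j lookup _hdom hpre
  obtain ⟨hi0, hilen, hj0, htake⟩ := hpre
  unfold Spec_find_total_possible_paths_py
  set L := lookup.getD [] with hL
  set I := i.toNat with hIdef
  set J := j.toNat with hJdef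
  have hi : i = (I : Int) := by omega
  have hj : j = (J : Int) := by omega
  have hI : I < matrix.length := by omega
  have hJ : ∀ r : Nat, r ≤ I → J < (matrix.getD r []).length := by
    intro r hr
    have := htake _ (pvRow_mem_take hI hr)
    omega
  -- A side
  obtain ⟨ext', heqA, _⟩ := pvGoA_main matrix L I J hI hJ (I + J + 1) I J le_rfl le_rfl
    (by omega) [] (by intro e he; simp at he)
  rw [List.append_nil] at heqA
  have hA : find_total_possible_paths_py matrix i j lookup = pvF matrix L I J := by
    unfold find_total_possible_paths_py
    rw [hi, hj, ← hL]
    simp only [Int.toNat_natCast]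
    rw [heqA]
  -- B side
  have hB : find_total_possible_paths_py_alt matrix i j lookup = pvF matrix L I J := by
    unfold find_total_possible_paths_py_alt
    rw [hi, hj, ← hL]
    have hrange : PySem.List.pyRange 0 ((I : Int) + 1) 1 =
        (List.range (I + 1)).map (fun (k : Nat) => (k : Int)) := by
      rw [show ((I : Int) + 1) = ((I + 1 : Nat) : Int) by push_cast; ring]
      exact PySem.List.pyRange_zero_natCast (I + 1)
    rw [hrange, List.foldl_map]
    rw [pvAltB_fold matrix L I J hI hJ (I + 1) le_rfl]
    simp only [Nat.add_sub_cancel, if_neg (Nat.succ_ne_zero I)]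
    rw [PySem.List.pyGetD_natCast]
    rw [List.getD_eq_getElem _ _ (by simp)]
    simp
  rw [hA, hB]
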